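-- pv_equiv track=rewrite | github.com/Szymon-Budziak/Algorithms_and_Data_Structures_course_AGH | Sort/26_index_equal_to_a_number.py | is_index_equal_to_number_integer
-- ===== SOURCE A (Python) =====
-- def is_index_equal_to_number_integer(T):
--     start = 0
--     end = len(T) - 1
--     while start <= end:
--         mid = (start + end) // 2
--         if T[mid] == mid:
--             return True
--         elif T[mid] > mid:
--             end = mid - 1
--         else:
--             start = mid + 1
--     return False
-- ===== SOURCE B (Python) =====
-- def is_index_equal_to_number_integer(T):
--     def rec(sub, off):
--         if not sub:
--             return False
--         m = (len(sub) - 1) // 2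
--         v = sub[m]
--         if v == off + m:
--             return True
--         if v > off + m:
--             return rec(sub[:m], off)
--         return rec(sub[m + 1:], off + m + 1)
--     return rec(T, 0)
-- ===== Notes on version B (the rewrite author's own statement) =====
-- stated objective: alternative
-- what changed: The iterative while-loop binary search over index bounds is replaced by a recursive divide-and-conquer on actual sublists: a helper recurses on the slice T[:m] or T[m+1:] carrying an index offset, with emptiness of the slice as the base case.
import Mathlib
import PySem

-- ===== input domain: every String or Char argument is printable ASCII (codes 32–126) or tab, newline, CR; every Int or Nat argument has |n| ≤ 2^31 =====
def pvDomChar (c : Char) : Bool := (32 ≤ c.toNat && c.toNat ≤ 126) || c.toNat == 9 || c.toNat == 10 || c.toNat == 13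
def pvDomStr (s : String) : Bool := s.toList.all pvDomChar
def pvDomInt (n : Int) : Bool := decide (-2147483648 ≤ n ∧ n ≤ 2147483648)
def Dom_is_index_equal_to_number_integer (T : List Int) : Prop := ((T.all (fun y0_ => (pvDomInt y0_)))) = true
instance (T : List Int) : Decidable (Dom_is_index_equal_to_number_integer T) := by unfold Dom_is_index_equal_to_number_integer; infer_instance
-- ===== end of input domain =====

-- B replaces the iterative bound-tracking binary search by a divide-and-conquer recursion on
-- actual sublists with an index offset (objective: alternative; same results on every list).

-- ===== PORT A =====
-- the while loop of A: state (start, end), decreasing measure end+1-start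
def pvLoopA (T : List Int) (s e : Int) : Bool :=
  if hse : s ≤ e then
    let mid := PySem.Int.floordiv (s + e) 2
    match PySem.List.pyGet? T mid with
    | some v =>
      if v = mid then true
      else if v > mid then pvLoopA T s (mid - 1)
      else pvLoopA T (mid + 1) e
    | none => false    -- T[mid] would raise IndexError; never reached for 0 ≤ s, e < len T
  else false
termination_by (e + 1 - s).toNat
decreasing_by
  · have := PySem.Int.floordiv_two_mid_bounds hse; omega
  · have := PySem.Int.floordiv_two_mid_bounds hse; omega

def is_index_equal_to_number_integer (T : List Int) : Bool :=
  pvLoopA T 0 ((T.length : Int) - 1)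

-- ===== PORT B =====
-- rec(sub, off) from Source B: recursion on the sublist, off = index of sub[0] in the original list
def pvRecB (sub : List Int) (off : Int) : Bool :=
  if sub = [] then false
  else
    let m := PySem.Int.floordiv ((sub.length : Int) - 1) 2
    match PySem.List.pyGet? sub m with
    | some v =>
      if v = off + m then true
      else if v > off + m then pvRecB (PySem.List.slice sub none (some m)) off
      else pvRecB (PySem.List.slice sub (some (m + 1)) none) (off + m + 1)
    | none => false    -- sub[m] would raise IndexError; never reached (0 ≤ m < len sub)
termination_by sub.length
decreasing_by
  · have hne : sub.length ≠ 0 := by simpa [List.length_eq_zero_iff] using ‹¬ sub = []›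
    rw [PySem.List.slice_to sub (by
      have := PySem.Int.floordiv_two_mid_bounds (lo := 0) (hi := (sub.length : Int) - 1)
        (by omega : (0:Int) ≤ (sub.length : Int) - 1)
      simpa using this.1)]
    simp [List.length_take]
    omega
  · have hne : sub.length ≠ 0 := by simpa [List.length_eq_zero_iff] using ‹¬ sub = []›
    have h0 : (0:Int) ≤ PySem.Int.floordiv ((sub.length : Int) - 1) 2 := by
      have := PySem.Int.floordiv_two_mid_bounds (lo := 0) (hi := (sub.length : Int) - 1)
        (by omega : (0:Int) ≤ (sub.length : Int) - 1)
      simpa using this.1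
    rw [PySem.List.slice_from sub (by omega)]
    simp [List.length_drop]
    omega

def is_index_equal_to_number_integer_alt (T : List Int) : Bool :=
  pvRecB T 0

-- ===== PRECONDITION & SPEC =====
def Spec_is_index_equal_to_number_integer (T : List Int) (out : Bool) : Prop := out = is_index_equal_to_number_integer_alt T
instance (T : List Int) (out : Bool) : Decidable (Spec_is_index_equal_to_number_integer T out) := by unfold Spec_is_index_equal_to_number_integer; infer_instance

-- ===== CLAIM (what is proved, stated in full; the proofs are below) =====
def Claim_equal_is_index_equal_to_number_integer : Prop := ∀ (T : List Int), Dom_is_index_equal_to_number_integer T → Spec_is_index_equal_to_number_integer T (is_index_equal_to_number_integer T)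

-- ===== LEMMAS AND PROOFS =====

-- the loop on bounds [s, e] equals the recursion on the sublist T[s : e+1] with offset s
theorem pvLoopA_eq_pvRecB (n : Nat) :
    ∀ (T : List Int) (s e : Int), 0 ≤ s → e < (T.length : Int) → (e + 1 - s).toNat = n →
      pvLoopA T s e = pvRecB ((T.drop s.toNat).take n) s := by
  induction n using Nat.strong_induction_on with
  | _ n IH =>
    intro T s e hs he hn
    by_cases hse : s ≤ e
    · -- loop body runs
      have hn1 : 1 ≤ n := by omega
      have hfdA : PySem.Int.floordiv (s + e) 2 = (s + e) / 2 :=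
        PySem.Int.floordiv_eq_ediv_of_pos (by norm_num)
      set mid := PySem.Int.floordiv (s + e) 2 with hmiddef
      have hmid : s ≤ mid ∧ mid ≤ e := PySem.Int.floordiv_two_mid_bounds hse
      set sub := (T.drop s.toNat).take n with hsubdef
      have hlen : sub.length = n := by
        simp only [hsubdef, List.length_take, List.length_drop]
        omega
      have hsubne : sub ≠ [] := by
        intro hnil
        rw [hnil] at hlen
        simp at hlen
        omega
      have hfdB : PySem.Int.floordiv ((sub.length : Int) - 1) 2 = ((n : Int) - 1) / 2 := by
        rw [hlen]
        exact PySem.Int.floordiv_eq_ediv_of_pos (by norm_num)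
      set m := PySem.Int.floordiv ((sub.length : Int) - 1) 2 with hmdef
      have hm0 : 0 ≤ m ∧ m < (n : Int) := by
        rw [hfdB]; omega
      have hmid_eq : mid = s + m := by
        rw [hfdA, hfdB]; omega
      -- the inspected elements coincide
      have hmidNat : mid.toNat = s.toNat + m.toNat := by omega
      have hmlt : m.toNat < sub.length := by omega
      have hmidlt : mid.toNat < T.length := by omega
      have hgetA : PySem.List.pyGet? T mid = some T[mid.toNat] :=
        PySem.List.pyGet?_eq_some_getElem T (by omega) (by omega)
      have hgetB : PySem.List.pyGet? sub m = some sub[m.toNat] :=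
        PySem.List.pyGet?_eq_some_getElem sub hm0.1 (by omega)
      have hval : sub[m.toNat]'hmlt = T[mid.toNat]'hmidlt := by
        simp only [hsubdef, List.getElem_take, List.getElem_drop]
        congr 1
        omega
      rw [pvLoopA]
      rw [dif_pos hse]
      rw [pvRecB]
      rw [if_neg hsubne]
      simp only [← hmiddef, ← hmdef, hgetA, hgetB, hval, ← hmid_eq, gt_iff_lt]
      have hsliceL : PySem.List.slice sub none (some m) = List.take m.toNat (List.drop s.toNat T) := by
        rw [PySem.List.slice_to sub hm0.1, hsubdef, List.take_take]
        congr 1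
        omega
      have hsliceR : PySem.List.slice sub (some (m + 1)) =
          List.take (n - (m.toNat + 1)) (List.drop (mid + 1).toNat T) := by
        rw [PySem.List.slice_from sub (by omega), hsubdef, List.drop_take, List.drop_drop]
        have e1 : (m + 1).toNat = m.toNat + 1 := by omega
        have e2 : (mid + 1).toNat = s.toNat + (m.toNat + 1) := by omega
        rw [e1, e2]
      rw [hsliceL, hsliceR,
          ← IH m.toNat (by omega) T s (mid - 1) hs (by omega) (by omega),
          ← IH (n - (m.toNat + 1)) (by omega) T (mid + 1) e (by omega) he (by omega)]
    · -- loop exits immediately: both sides are False on the empty range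
      have hn0 : n = 0 := by omega
      rw [pvLoopA, dif_neg hse, hn0]
      rw [pvRecB]
      simp

-- ===== VERDICT (by name: the statement is the Claim_ definition above) =====
theorem is_index_equal_to_number_integer_spec : Claim_equal_is_index_equal_to_number_integer := by
  intro T _
  unfold Spec_is_index_equal_to_number_integer is_index_equal_to_number_integer is_index_equal_to_number_integer_alt
  have h := pvLoopA_eq_pvRecB T.length T 0 ((T.length : Int) - 1) (by omega) (by omega) (by omega)
  simpa using h
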